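-- pv_equiv track=rewrite | github.com/blsouthcott/top-tracks-hub | app/scrape_top_tracks.py | rm_quotes
-- ===== SOURCE A (Python) =====
-- def rm_quotes(string):
--
--     quote_chars = {
--         chr(34),
--         chr(39),
--         chr(8216),
--         chr(8217),
--         chr(8219),
--         chr(8220),
--         chr(8221)
--     }
--
--     for char in quote_chars:
--         if char in string:
--             string = string.replace(char, "")
--     return string
-- ===== SOURCE B (Python) =====
-- def rm_quotes(string):
--     quote_chars = {
--         chr(34),
--         chr(39),
--         chr(8216),
--         chr(8217),
--         chr(8219),
--         chr(8220),
--         chr(8221)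
--     }
--     return "".join(c for c in string if c not in quote_chars)
-- ===== Notes on version B (the rewrite author's own statement) =====
-- stated objective: idiomatic
-- what changed: B makes a single filtering pass over the input's characters joining those not in the quote set, instead of A's up-to-7 sequential str.replace passes (one whole-string scan per quote character).
import Mathlib
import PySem

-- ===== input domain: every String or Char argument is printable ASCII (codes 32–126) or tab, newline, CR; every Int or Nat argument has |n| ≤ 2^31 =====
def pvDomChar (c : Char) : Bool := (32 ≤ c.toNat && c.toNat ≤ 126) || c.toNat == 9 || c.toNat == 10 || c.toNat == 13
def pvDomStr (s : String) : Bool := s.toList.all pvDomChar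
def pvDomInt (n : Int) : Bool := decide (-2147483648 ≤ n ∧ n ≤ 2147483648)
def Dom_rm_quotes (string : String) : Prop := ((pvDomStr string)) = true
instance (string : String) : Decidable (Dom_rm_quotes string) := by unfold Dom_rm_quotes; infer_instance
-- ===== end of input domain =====

-- B removes quote characters with one filtering pass ("".join of non-quote chars) instead of A's up-to-7 sequential str.replace passes; same return value on all strings.


-- the seven quote characters of A's (and B's) set literal, in source order
def pvQuoteChars : PySem.Set Char :=
  PySem.Set.ofList [Char.ofNat 34, Char.ofNat 39, Char.ofNat 8216, Char.ofNat 8217,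
                    Char.ofNat 8219, Char.ofNat 8220, Char.ofNat 8221]

-- ===== PORT A =====
-- for char in quote_chars: if char in string: string = string.replace(char, "")
def rm_quotes (string : String) : String :=
  pvQuoteChars.foldl
    (fun s c =>
      if PySem.Str.isIn (String.ofList [c]) s
      then PySem.Str.replace s (String.ofList [c]) ""
      else s)
    string

-- ===== PORT B =====
-- "".join(c for c in string if c not in quote_chars)
def rm_quotes_alt (string : String) : String :=
  String.ofList (string.toList.filter (fun c => !(PySem.Set.contains pvQuoteChars c)))

-- ===== PRECONDITION & SPEC =====
def Spec_rm_quotes (string : String) (out : String) : Prop := out = rm_quotes_alt string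
instance (string : String) (out : String) : Decidable (Spec_rm_quotes string out) := by unfold Spec_rm_quotes; infer_instance

-- ===== CLAIM (what is proved, stated in full; the proofs are below) =====
def Claim_equal_rm_quotes : Prop := ∀ (string : String), Dom_rm_quotes string → Spec_rm_quotes string (rm_quotes string)

-- ===== LEMMAS AND PROOFS =====

-- replace.go with a single-char pattern and empty replacement filters that char out
theorem pvGo_filter (c : Char) (fuel : Nat) (l acc : List Char) (h : l.length ≤ fuel) :
    PySem.Chars.replace.go [c] [] fuel l acc = acc.reverse ++ l.filter (· ≠ c) := by
  induction fuel generalizing l acc with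
  | zero =>
    have : l = [] := List.length_eq_zero_iff.mp (Nat.le_zero.mp h)
    subst this
    simp [PySem.Chars.replace.go]
  | succ n ih =>
    cases l with
    | nil => simp [PySem.Chars.replace.go]
    | cons a t =>
      simp only [PySem.Chars.replace.go, List.length_cons] at h ⊢
      by_cases hac : a = c
      · subst hac
        rw [if_pos (by simp [List.isPrefixOf])]
        rw [show List.drop ([].length + 1) (a :: t) = t from rfl]
        rw [ih t _ (by omega)]
        simp
      · rw [if_neg (by simp [List.isPrefixOf]; exact fun hh => hac hh.symm)]
        rw [ih t (a :: acc) (by omega)]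
        simp [hac]

theorem pvReplace_filter (s : String) (c : Char) :
    (PySem.Str.replace s (String.ofList [c]) "").toList = s.toList.filter (· ≠ c) := by
  rw [PySem.Str.toList_replace]
  simp only [String.toList_ofList]
  rw [show "".toList = ([] : List Char) from rfl]
  rw [show PySem.Chars.replace s.toList [c] [] =
      PySem.Chars.replace.go [c] [] s.toList.length s.toList [] by
    simp [PySem.Chars.replace]]
  simpa using pvGo_filter c s.toList.length s.toList [] (le_refl _)

-- one step of A's loop filters the character out, whether or not the membership test fires
theorem pvStep_filter (s : String) (c : Char) :
    (if PySem.Str.isIn (String.ofList [c]) s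
     then PySem.Str.replace s (String.ofList [c]) ""
     else s).toList = s.toList.filter (· ≠ c) := by
  by_cases h : PySem.Str.isIn (String.ofList [c]) s = true
  · rw [if_pos h, pvReplace_filter]
  · rw [if_neg h]
    have hnmem : c ∉ s.toList := by
      intro hc
      apply h
      rw [PySem.Str.isIn_iff_infix, String.toList_ofList]
      exact (List.singleton_infix_iff c s.toList).mpr hc
    exact ((List.filter_eq_self).mpr (fun a ha => by
      simp only [decide_eq_true_eq]
      rintro rfl; exact hnmem ha)).symm

-- folding A's step over a list of characters filters out all of them
theorem pvFold_filter (qs : List Char) (s : String) :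
    (qs.foldl
      (fun s c =>
        if PySem.Str.isIn (String.ofList [c]) s
        then PySem.Str.replace s (String.ofList [c]) ""
        else s)
      s).toList = s.toList.filter (fun c => !(qs.contains c)) := by
  induction qs generalizing s with
  | nil => simp
  | cons q t ih =>
    simp only [List.foldl_cons]
    rw [ih, pvStep_filter, List.filter_filter]
    apply List.filter_congr
    intro a _
    by_cases h : a = q <;> simp [h]

theorem rm_quotes_eq (s : String) : rm_quotes s = rm_quotes_alt s := by
  apply String.ext  -- equal toLists
  show (rm_quotes s).toList = (rm_quotes_alt s).toList
  unfold rm_quotes rm_quotes_alt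
  rw [pvFold_filter]
  simp only [String.toList_ofList]
  apply List.filter_congr
  intro a _
  rw [PySem.Set.contains_eq_listContains]

-- ===== VERDICT (by name: the statement is the Claim_ definition above) =====
theorem rm_quotes_spec : Claim_equal_rm_quotes := by
  intro s _
  exact rm_quotes_eq s
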